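-- pv_equiv track=rewrite | github.com/valentk777/Competitive-Programming | Codeforces/Python/_Educational Rounds/Educational Codeforces Round 134 (Rated for Div. 2)/D.py | is_possible_to_get_max
-- ===== SOURCE A (Python) =====
-- from collections import defaultdict
--
-- _dp = lambda default_value: defaultdict(lambda: default_value)
--
-- def is_possible_to_get_max(pre, a, b, n):
--     _counts = _dp(0)
--
--     for i in range(n):
--         _counts[a[i] & pre] += 1
--         _counts[(b[i] & pre) ^ pre] -= 1
--
--     for value in _counts.values():
--         if value != 0:
--             return False
--
--     return True
-- ===== SOURCE B (Python) =====
-- def is_possible_to_get_max(pre, a, b, n):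
--     m = max(n, 0)
--     xs = sorted(x & pre for x in a[:m])
--     ys = sorted((y & pre) ^ pre for y in b[:m])
--     return xs == ys
-- ===== Notes on version B (the rewrite author's own statement) =====
-- stated objective: simpler
-- what changed: Replaces the signed-counting defaultdict built by an indexed loop over range(n) (increment/decrement per pair, then scan values for nonzero) with slicing the first max(n,0) elements of each list, masking them, and comparing the two multisets via sorted lists.
import Mathlib
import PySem

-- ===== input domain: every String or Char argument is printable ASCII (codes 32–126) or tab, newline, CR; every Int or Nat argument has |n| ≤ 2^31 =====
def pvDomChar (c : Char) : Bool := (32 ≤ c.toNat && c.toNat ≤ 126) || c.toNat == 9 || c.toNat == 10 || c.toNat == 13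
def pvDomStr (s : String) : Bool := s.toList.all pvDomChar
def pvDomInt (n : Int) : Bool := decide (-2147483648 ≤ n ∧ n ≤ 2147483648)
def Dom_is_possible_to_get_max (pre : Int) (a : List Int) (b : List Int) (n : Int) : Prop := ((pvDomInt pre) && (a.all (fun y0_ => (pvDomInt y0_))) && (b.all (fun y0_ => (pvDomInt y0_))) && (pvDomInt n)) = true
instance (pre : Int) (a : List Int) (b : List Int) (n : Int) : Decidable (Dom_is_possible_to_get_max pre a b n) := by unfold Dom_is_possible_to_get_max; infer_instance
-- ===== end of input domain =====

-- B replaces A's signed-counting defaultdict over indexed range(n) with slicing/masking the first max(n,0) elements and comparing sorted copies (objective: simpler).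


-- ===== PORT A =====
def is_possible_to_get_max (pre : Int) (a : List Int) (b : List Int) (n : Int) : Bool :=
  let counts : PySem.Dict Int Int :=
    (PySem.List.pyRange 0 n 1).foldl
      (fun d i =>
        (d.modify (PySem.Int.band (PySem.List.pyGetD a i 0) pre) 0 (fun v => v + 1)).modify
          (PySem.Int.bxor (PySem.Int.band (PySem.List.pyGetD b i 0) pre) pre) 0 (fun v => v - 1))
      PySem.Dict.empty
  counts.values.all (fun v => v == 0)

-- ===== PORT B =====
def is_possible_to_get_max_alt (pre : Int) (a : List Int) (b : List Int) (n : Int) : Bool :=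
  let m := max n 0
  let xs := PySem.List.sorted ((PySem.List.slice a none (some m)).map (fun x => PySem.Int.band x pre)) (fun x => x) false
  let ys := PySem.List.sorted ((PySem.List.slice b none (some m)).map (fun y => PySem.Int.bxor (PySem.Int.band y pre) pre)) (fun x => x) false
  xs == ys

-- ===== PRECONDITION & SPEC =====
-- Pre_ excludes exactly the inputs on which A raises IndexError: n larger than the length of a or b.
def Pre_is_possible_to_get_max (pre : Int) (a : List Int) (b : List Int) (n : Int) : Prop :=
  n ≤ (a.length : Int) ∧ n ≤ (b.length : Int)
instance (pre : Int) (a : List Int) (b : List Int) (n : Int) : Decidable (Pre_is_possible_to_get_max pre a b n) := by unfold Pre_is_possible_to_get_max; infer_instance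
def pvWitness_is_possible_to_get_max : Int × List Int × List Int × Int := (5, [3, 6], [2, 5], 2)
def Spec_is_possible_to_get_max (pre : Int) (a : List Int) (b : List Int) (n : Int) (out : Bool) : Prop := out = is_possible_to_get_max_alt pre a b n
instance (pre : Int) (a : List Int) (b : List Int) (n : Int) (out : Bool) : Decidable (Spec_is_possible_to_get_max pre a b n out) := by unfold Spec_is_possible_to_get_max; infer_instance

-- ===== CLAIM (what is proved, stated in full; the proofs are below) =====
def Claim_equal_is_possible_to_get_max : Prop := ∀ (pre : Int) (a : List Int) (b : List Int) (n : Int), Dom_is_possible_to_get_max pre a b n → Pre_is_possible_to_get_max pre a b n → Spec_is_possible_to_get_max pre a b n (is_possible_to_get_max pre a b n)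

-- ===== LEMMAS AND PROOFS =====

-- getD of A's interleaved ±1 counting loop: start value plus the signed difference of the two counts.
lemma counts_getD (f g : Int → Int) (l : List Int) (d : PySem.Dict Int Int) (k : Int) :
    (l.foldl (fun d i => (d.modify (f i) 0 (fun v => v + 1)).modify (g i) 0 (fun v => v - 1)) d).getD k 0
      = d.getD k 0 + ((l.map f).count k : Int) - ((l.map g).count k : Int) := by
  induction l generalizing d with
  | nil => simp
  | cons i t ih =>
    simp only [List.foldl_cons, ih, List.map_cons, List.count_cons]
    simp only [PySem.Dict.getD_modify]
    push_cast
    split_ifs <;> simp_all <;> omega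

-- keys stay Nodup through A's interleaved modify loop.
lemma counts_nodup (f g : Int → Int) (l : List Int) (d : PySem.Dict Int Int)
    (h : d.keys.Nodup) :
    (l.foldl (fun d i => (d.modify (f i) 0 (fun v => v + 1)).modify (g i) 0 (fun v => v - 1)) d).keys.Nodup := by
  induction l generalizing d with
  | nil => exact h
  | cons i t ih =>
    apply ih
    have h1 : (d.modify (f i) 0 (fun v => v + 1)).keys.Nodup := by
      have := PySem.Dict.nodup_keys_foldl_modify_key [i] (fun x => f x) 0 (fun _ _ v => v + 1) d h
      simpa using this
    have := PySem.Dict.nodup_keys_foldl_modify_key [i] (fun x => g x) 0 (fun _ _ v => v - 1)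
      (d.modify (f i) 0 (fun v => v + 1)) h1
    simpa using this

-- A's value scan: all dict values zero ↔ every lookup (with default 0) is zero, for a Nodup-keys dict.
lemma values_all_zero (d : PySem.Dict Int Int) (h : d.keys.Nodup) :
    (d.values.all (fun v => v == 0)) = true ↔ ∀ k : Int, d.getD k 0 = 0 := by
  rw [PySem.Dict.values_eq_map_keys d h 0]
  simp only [List.all_map, List.all_eq_true, Function.comp, beq_iff_eq]
  constructor
  · intro hall k
    by_cases hk : k ∈ d.keys
    · exact hall k hk
    · rw [PySem.Dict.getD_of_not_contains]
      rw [PySem.Dict.contains_eq_decide_mem_keys]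
      simpa using hk
  · intro hall k _
    exact hall k

-- A's counting scheme is the multiset equality of the two mapped lists.
lemma main_eq (f g : Int → Int) (l : List Int) :
    ((l.foldl (fun d i => (d.modify (f i) 0 (fun v => v + 1)).modify (g i) 0 (fun v => v - 1))
        (PySem.Dict.empty : PySem.Dict Int Int)).values.all (fun v => v == 0))
      = (PySem.List.sorted (l.map f) (fun x => x) false == PySem.List.sorted (l.map g) (fun x => x) false) := by
  apply Bool.eq_iff_iff.mpr
  rw [values_all_zero _ (counts_nodup f g l PySem.Dict.empty (by simp))]
  rw [beq_iff_eq, PySem.List.sorted_id_eq_sorted_id_iff_perm, List.perm_iff_count]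
  constructor
  · intro h k
    have := h k; rw [counts_getD] at this; simp at this; omega
  · intro h k
    rw [counts_getD, h k]; simp

-- indexing over range(n) with n within bounds visits exactly the first n elements.
lemma map_getD_pyRange_take (f : Int → Int) (xs : List Int) (n : Int)
    (h0 : 0 ≤ n) (hn : n ≤ (xs.length : Int)) :
    (PySem.List.pyRange 0 n 1).map (fun i => f (PySem.List.pyGetD xs i 0)) = (xs.take n.toNat).map f := by
  rw [PySem.List.pyRange_one]
  rw [List.map_map]
  apply List.ext_getElem
  · simp; omega
  · intro k h1 h2
    simp only [List.getElem_map, List.getElem_range, Function.comp]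
    have hk : k < n.toNat := by simpa using h1
    have hklen : k < xs.length := by omega
    rw [show ((0 : Int) + (k : Int)) = ((k : Nat) : Int) by omega]
    rw [PySem.List.pyGetD_natCast]
    simp [List.getD_eq_getElem?_getD, List.getElem?_eq_getElem hklen, hklen]

-- ===== VERDICT (by name: the statement is the Claim_ definition above) =====
theorem is_possible_to_get_max_spec : Claim_equal_is_possible_to_get_max := by
  intro pre a b n _ hpre
  obtain ⟨ha', hb'⟩ := hpre
  unfold Spec_is_possible_to_get_max is_possible_to_get_max is_possible_to_get_max_alt
  have h0 : (0 : Int) ≤ max n 0 := le_max_right n 0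
  have ha : max n 0 ≤ (a.length : Int) := by have := Int.natCast_nonneg a.length; omega
  have hb : max n 0 ≤ (b.length : Int) := by have := Int.natCast_nonneg b.length; omega
  have hr : PySem.List.pyRange 0 n 1 = PySem.List.pyRange 0 (max n 0) 1 := by
    by_cases h : 0 ≤ n
    · rw [max_eq_left h]
    · rw [PySem.List.pyRange_one_eq_nil (by omega), PySem.List.pyRange_one_eq_nil (by omega)]
  rw [hr, main_eq (fun i => PySem.Int.band (PySem.List.pyGetD a i 0) pre)
    (fun i => PySem.Int.bxor (PySem.Int.band (PySem.List.pyGetD b i 0) pre) pre)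
    (PySem.List.pyRange 0 (max n 0) 1)]
  rw [map_getD_pyRange_take (fun x => PySem.Int.band x pre) a (max n 0) h0 ha,
      map_getD_pyRange_take (fun y => PySem.Int.bxor (PySem.Int.band y pre) pre) b (max n 0) h0 hb]
  simp only [PySem.List.slice_to a h0, PySem.List.slice_to b h0]
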